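-- pv_equiv track=rewrite | github.com/pypi-data/pypi-mirror-402 | packages/Dataframe-timeseries-mon/dataframe_timeseries_mon-1.0.0-py3-none-any.whl/PBM_SUPPORT_DF_WINDOW.py | _sanitize_token
-- ===== SOURCE A (Python) =====
-- from typing import Any, Callable, Hashable, List, Optional, Sequence, Tuple, Union, Dict
--
-- def _sanitize_token(s: Any) -> str:
--     out = []
--     for ch in str(s):
--         if ch.isalnum():
--             out.append(ch.upper())
--         else:
--             out.append("_")
--     token = "".join(out)
--     while "__" in token:
--         token = token.replace("__", "_")
--     token = token.strip("_")
--     return token if token else "AUTO"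
-- ===== SOURCE B (Python) =====
-- def _sanitize_token(s):
--     words = []
--     buf = []
--     for ch in str(s):
--         if ch.isalnum():
--             buf.append(ch.upper())
--         elif buf:
--             words.append("".join(buf))
--             buf = []
--     if buf:
--         words.append("".join(buf))
--     return "_".join(words) if words else "AUTO"
-- ===== Notes on version B (the rewrite author's own statement) =====
-- stated objective: simpler
-- what changed: replaced A's three-pass structure (map every char to its sanitized form, repeatedly collapse doubled separators in a while loop, then strip edge separators) with a single pass that collects the alnum runs as uppercased words and joins them with the separator
import Mathlib
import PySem

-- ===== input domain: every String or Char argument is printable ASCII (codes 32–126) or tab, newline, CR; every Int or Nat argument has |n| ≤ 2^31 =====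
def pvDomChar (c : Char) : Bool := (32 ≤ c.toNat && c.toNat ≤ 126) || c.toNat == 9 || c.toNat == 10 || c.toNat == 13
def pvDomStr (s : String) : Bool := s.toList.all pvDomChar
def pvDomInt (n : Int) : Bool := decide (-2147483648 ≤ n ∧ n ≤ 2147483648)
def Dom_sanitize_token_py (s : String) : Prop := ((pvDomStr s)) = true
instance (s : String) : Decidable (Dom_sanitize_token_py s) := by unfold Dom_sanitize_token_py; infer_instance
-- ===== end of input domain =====

-- B replaces A's map-every-char pass + repeated replace("__","_") collapse loop + strip('_')
-- by a single pass that collects the alnum runs as uppercased words and joins them with '_' (simpler).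

-- ===== PORT A =====
-- pvRep is one `token.replace("__", "_")` pass, proved equal to PySem.Chars.replace below;
-- A's `while "__" in token` loop (pvCollapse) cites its length lemmas for termination.
def pvRep : List Char → List Char
  | [] => []
  | [c] => [c]
  | c1 :: c2 :: t => if c1 = '_' ∧ c2 = '_' then '_' :: pvRep t else c1 :: pvRep (c2 :: t)

theorem pvGo_zero (l acc : List Char) :
    PySem.Chars.replace.go ['_','_'] ['_'] 0 l acc = acc.reverse ++ l := rfl

theorem pvGo_nil (fuel : Nat) (acc : List Char) :
    PySem.Chars.replace.go ['_','_'] ['_'] (fuel+1) [] acc = acc.reverse := rfl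

theorem pvGo_cons (fuel : Nat) (c : Char) (t acc : List Char) :
    PySem.Chars.replace.go ['_','_'] ['_'] (fuel+1) (c::t) acc =
      if List.isPrefixOf ['_','_'] (c::t) then
        PySem.Chars.replace.go ['_','_'] ['_'] fuel (List.drop 2 (c::t)) (['_'].reverse ++ acc)
      else PySem.Chars.replace.go ['_','_'] ['_'] fuel t (c::acc) := rfl

theorem pvRep_cons_not_prefix (c : Char) (t : List Char)
    (hp : ¬ List.isPrefixOf ['_','_'] (c::t) = true) : pvRep (c :: t) = c :: pvRep t := by
  rcases t with _ | ⟨c2, t2⟩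
  · rfl
  · rw [pvRep, if_neg]
    rintro ⟨rfl, rfl⟩
    exact hp (by simp)

theorem pvGo_spec (fuel : Nat) (l acc : List Char) (h : l.length ≤ fuel) :
    PySem.Chars.replace.go ['_','_'] ['_'] fuel l acc = acc.reverse ++ pvRep l := by
  induction fuel generalizing l acc with
  | zero =>
    have : l = [] := by cases l <;> simp_all
    subst this; rw [pvGo_zero]; rfl
  | succ fuel ih =>
    match l with
    | [] => rw [pvGo_nil]; simp [pvRep]
    | c :: t =>
      rw [pvGo_cons]
      by_cases hp : List.isPrefixOf ['_','_'] (c::t) = true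
      · have hpre := List.isPrefixOf_iff_prefix.mp hp
        rw [List.cons_prefix_cons] at hpre
        obtain ⟨he1, hpre⟩ := hpre
        rcases t with _ | ⟨c2, t2⟩
        · exact absurd hpre (by simp)
        · rw [List.cons_prefix_cons] at hpre
          obtain ⟨he2, _⟩ := hpre
          subst he1; subst he2
          rw [if_pos hp]
          simp only [List.length_cons] at h
          rw [show List.drop 2 ('_' :: '_' :: t2) = t2 from rfl,
              show (['_'] : List Char).reverse ++ acc = '_' :: acc from rfl,
              ih t2 (('_' : Char) :: acc) (by omega)]
          rw [pvRep, if_pos ⟨rfl, rfl⟩]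
          simp
      · rw [if_neg hp, ih t (c :: acc) (by simp at h; omega), pvRep_cons_not_prefix c t hp]
        simp

theorem replace_eq_pvRep (l : List Char) :
    PySem.Chars.replace l ['_','_'] ['_'] = pvRep l := by
  rw [PySem.Chars.replace, if_neg (by simp)]
  simpa using pvGo_spec l.length l [] le_rfl

theorem pvRep_length_le (l : List Char) : (pvRep l).length ≤ l.length := by
  induction l using pvRep.induct with
  | case1 => simp [pvRep]
  | case2 c => simp [pvRep]
  | case3 c1 c2 t h ih => simp [pvRep, h]; omega
  | case4 c1 c2 t h ih => simp only [pvRep, if_neg h]; simp at ih ⊢; omega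

theorem pvRep_length_lt (l : List Char) (h : ['_','_'] <:+: l) :
    (pvRep l).length < l.length := by
  induction l using pvRep.induct with
  | case1 => exact absurd (List.eq_nil_of_infix_nil h) (by simp)
  | case2 c => have := h.length_le; simp at this
  | case3 c1 c2 t hc ih =>
    obtain ⟨h1, h2⟩ := hc; subst h1; subst h2
    have := pvRep_length_le t
    simp [pvRep]; omega
  | case4 c1 c2 t hc ih =>
    have h2 : ['_','_'] <:+: c2 :: t := by
      rcases List.infix_cons_iff.mp h with hp | hi
      · rw [List.cons_prefix_cons] at hp
        obtain ⟨e1, hp⟩ := hp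
        rw [List.cons_prefix_cons] at hp
        exact absurd ⟨e1.symm, hp.1.symm⟩ hc
      · exact hi
    simp only [pvRep, if_neg hc, List.length_cons]
    exact Nat.succ_lt_succ (ih h2)

-- A's `while "__" in token: token = token.replace("__", "_")` loop
def pvCollapse (t : List Char) : List Char :=
  if h : PySem.Chars.isIn ['_','_'] t = true then
    pvCollapse (PySem.Chars.replace t ['_','_'] ['_'])
  else t
termination_by t.length
decreasing_by
  rw [replace_eq_pvRep]
  exact pvRep_length_lt _ ((PySem.Chars.isIn_iff_infix _ _).mp h)

def sanitize_token_py (s : String) : String :=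
  let out := s.toList.foldl (fun acc ch =>
      if PySem.Chars.isalnum ch then acc ++ [PySem.Chars.upperChar ch] else acc ++ ['_']) []
  let token := pvCollapse out
  let token2 := PySem.Chars.stripChars token ['_']
  if token2 = [] then "AUTO" else String.mk token2

-- ===== PORT B =====
-- one step of B's loop: extend the current word buffer on an alnum char, flush it otherwise
def pvStepB (st : List (List Char) × List Char) (ch : Char) : List (List Char) × List Char :=
  if PySem.Chars.isalnum ch then (st.1, st.2 ++ [PySem.Chars.upperChar ch])
  else if st.2 = [] then st else (st.1 ++ [st.2], [])

def sanitize_token_py_alt (s : String) : String :=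
  let st := s.toList.foldl pvStepB ([], [])
  let ws := if st.2 = [] then st.1 else st.1 ++ [st.2]
  if ws = [] then "AUTO" else String.mk (PySem.Chars.join ['_'] ws)

-- ===== PRECONDITION & SPEC =====
def Spec_sanitize_token_py (s : String) (out : String) : Prop := out = sanitize_token_py_alt s
instance (s : String) (out : String) : Decidable (Spec_sanitize_token_py s out) := by unfold Spec_sanitize_token_py; infer_instance

-- ===== CLAIM (what is proved, stated in full; the proofs are below) =====
def Claim_equal_sanitize_token_py : Prop := ∀ (s : String), Dom_sanitize_token_py s → Spec_sanitize_token_py s (sanitize_token_py s)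

-- ===== LEMMAS AND PROOFS =====

-- the word decomposition both programs compute: maximal non-'_' runs, with a pending buffer
def pvWacc : List Char → List Char → List (List Char)
  | buf, [] => if buf = [] then [] else [buf]
  | buf, c :: t =>
    if c = '_' then (if buf = [] then [] else [buf]) ++ pvWacc [] t
    else pvWacc (buf ++ [c]) t

theorem pvWacc_nil (buf : List Char) : pvWacc buf [] = if buf = [] then [] else [buf] := rfl

theorem pvWacc_cons (buf : List Char) (c : Char) (t : List Char) :
    pvWacc buf (c :: t) =
      if c = '_' then (if buf = [] then [] else [buf]) ++ pvWacc [] t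
      else pvWacc (buf ++ [c]) t := rfl

theorem pvWacc_us (buf t) : pvWacc buf ('_' :: t) = (if buf = [] then [] else [buf]) ++ pvWacc [] t := by
  rw [pvWacc_cons, if_pos rfl]

theorem pvWacc_ne (buf : List Char) (c : Char) (t : List Char) (h : c ≠ '_') :
    pvWacc buf (c :: t) = pvWacc (buf ++ [c]) t := by
  rw [pvWacc_cons, if_neg h]

def pvF (ch : Char) : Char :=
  if PySem.Chars.isalnum ch then PySem.Chars.upperChar ch else '_'

theorem pvUpper_ne (c : Char) (h : PySem.Chars.isalnum c = true) :
    PySem.Chars.upperChar c ≠ '_' := by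
  rw [PySem.Chars.upperChar]
  by_cases hl : PySem.Chars.islower c = true
  · rw [if_pos hl]
    have hr : 97 ≤ c.toNat ∧ c.toNat ≤ 122 := by
      rw [PySem.Chars.islower] at hl
      simp only [Bool.and_eq_true, decide_eq_true_eq, Char.le_def] at hl
      exact ⟨hl.1, hl.2⟩
    intro heq
    have h2 := congrArg Char.toNat heq
    have hv : Nat.isValidChar (c.toNat - 32) := Or.inl (by omega)
    rw [Char.toNat_ofNat, if_pos hv] at h2
    have h95 : ('_').toNat = 95 := rfl
    rw [h95] at h2
    omega
  · rw [if_neg hl]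
    rintro rfl
    rw [PySem.Chars.isalnum, PySem.Chars.isalpha, PySem.Chars.isdigit,
        PySem.Chars.isupper, PySem.Chars.islower] at h
    simp at h

theorem pvFoldA (cs : List Char) (acc : List Char) :
    cs.foldl (fun acc ch =>
      if PySem.Chars.isalnum ch then acc ++ [PySem.Chars.upperChar ch] else acc ++ ['_']) acc
      = acc ++ cs.map pvF := by
  induction cs generalizing acc with
  | nil => simp
  | cons c t ih =>
    simp only [List.foldl_cons, List.map_cons]
    by_cases h : PySem.Chars.isalnum c = true
    · rw [if_pos h, ih]; simp [pvF, h]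
    · rw [if_neg h, ih]; simp [pvF, h]

theorem pvFoldB (cs : List Char) (ws : List (List Char)) (buf : List Char) :
    (if (cs.foldl pvStepB (ws, buf)).2 = [] then (cs.foldl pvStepB (ws, buf)).1
     else (cs.foldl pvStepB (ws, buf)).1 ++ [(cs.foldl pvStepB (ws, buf)).2])
      = ws ++ pvWacc buf (cs.map pvF) := by
  induction cs generalizing ws buf with
  | nil =>
    by_cases hb : buf = [] <;> simp [pvWacc, hb]
  | cons c t ih =>
    simp only [List.foldl_cons, List.map_cons]
    by_cases h : PySem.Chars.isalnum c = true
    · have hne := pvUpper_ne c h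
      rw [show pvStepB (ws, buf) c = (ws, buf ++ [PySem.Chars.upperChar c]) by
            simp [pvStepB, h]]
      rw [show pvF c = PySem.Chars.upperChar c by simp [pvF, h]]
      rw [pvWacc_ne _ _ _ hne]
      exact ih ws (buf ++ [PySem.Chars.upperChar c])
    · rw [show pvF c = '_' by simp [pvF, h]]
      rw [pvWacc, if_pos rfl]
      by_cases hb : buf = []
      · subst hb
        rw [show pvStepB (ws, ([] : List Char)) c = (ws, []) by simp [pvStepB, h]]
        simpa using ih ws []
      · rw [show pvStepB (ws, buf) c = (ws ++ [buf], []) by simp [pvStepB, h, hb]]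
        rw [if_neg hb, ih (ws ++ [buf]) []]
        simp
theorem pvWacc_pvRep (l : List Char) :
    ∀ buf, pvWacc buf (pvRep l) = pvWacc buf l := by
  induction l using pvRep.induct with
  | case1 => intro buf; simp [pvRep]
  | case2 c => intro buf; simp [pvRep]
  | case3 c1 c2 t hc ih =>
    obtain ⟨h1, h2⟩ := hc; subst h1; subst h2
    intro buf
    rw [pvRep, if_pos ⟨rfl, rfl⟩]
    rw [pvWacc_us, ih, pvWacc_us, pvWacc_us, if_pos rfl, List.nil_append]
  | case4 c1 c2 t hc ih =>
    intro buf
    rw [pvRep, if_neg hc]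
    by_cases h1 : c1 = '_'
    · subst h1
      rw [pvWacc_us, pvWacc_us, ih]
    · rw [pvWacc_ne _ _ _ h1, pvWacc_ne _ _ _ h1, ih]

theorem pvCollapse_spec (l : List Char) :
    pvWacc [] (pvCollapse l) = pvWacc [] l ∧
      PySem.Chars.isIn ['_','_'] (pvCollapse l) = false := by
  induction l using pvCollapse.induct with
  | case1 t h ih =>
    rw [pvCollapse, dif_pos h]
    refine ⟨?_, ih.2⟩
    rw [ih.1, replace_eq_pvRep, pvWacc_pvRep]
  | case2 t h =>
    rw [pvCollapse, dif_neg h]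
    exact ⟨rfl, by simpa using h⟩

def pvLst (l : List Char) : List Char := l.dropWhile (· == '_')
def pvRst (l : List Char) : List Char := (l.reverse.dropWhile (· == '_')).reverse

theorem pvStripChars_eq (l : List Char) :
    PySem.Chars.stripChars l ['_'] = pvRst (pvLst l) := by
  have hp : (fun c => List.contains ['_'] c) = (fun c : Char => c == '_') := by
    funext c
    show (['_'] : List Char).elem c = (c == '_')
    rw [List.elem_cons]
    cases h : c == '_' <;> simp
  rw [PySem.Chars.stripChars]
  simp only [hp]
  rfl

theorem pvRst_append (a x : List Char) (h : x.reverse.dropWhile (· == '_') ≠ []) :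
    pvRst (a ++ x) = a ++ pvRst x := by
  rw [pvRst, List.reverse_append, List.dropWhile_append, if_neg (by simpa using h)]
  simp [pvRst]

theorem pvRst_no_underscore (buf : List Char) (hb : buf ≠ []) (hu : '_' ∉ buf) :
    pvRst buf = buf := by
  rcases hr : buf.reverse with _ | ⟨b, t⟩
  · simp_all
  · have hbmem : b ∈ buf := by rw [← List.mem_reverse, hr]; simp
    have hbne : ¬ (b == '_') = true := by simp; rintro rfl; exact hu hbmem
    rw [pvRst, hr, List.dropWhile_cons_of_neg (p := fun x : Char => x == '_') hbne,
        ← hr, List.reverse_reverse]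

theorem pvWacc_ne_nil (l : List Char) : ∀ buf, buf ≠ [] → pvWacc buf l ≠ [] := by
  induction l with
  | nil => intro buf hb; rw [pvWacc_nil, if_neg hb]; simp
  | cons c t ih =>
    intro buf hb
    by_cases h1 : c = '_'
    · subst h1; rw [pvWacc_us, if_neg hb]; simp
    · rw [pvWacc_ne _ _ _ h1]; exact ih _ (by simp)

theorem pvWacc_mem_ne_nil (l : List Char) :
    ∀ buf, ∀ w ∈ pvWacc buf l, w ≠ [] := by
  induction l with
  | nil =>
    intro buf w hw
    by_cases hb : buf = []
    · rw [pvWacc_nil, if_pos hb] at hw; simp at hw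
    · rw [pvWacc_nil, if_neg hb] at hw; simp at hw; subst hw; exact hb
  | cons c t ih =>
    intro buf w hw
    by_cases h1 : c = '_'
    · subst h1
      rw [pvWacc_us] at hw
      rcases List.mem_append.mp hw with h | h
      · by_cases hb : buf = []
        · simp [hb] at h
        · simp [hb] at h; subst h; exact hb
      · exact ih [] w h
    · rw [pvWacc_ne _ _ _ h1] at hw
      exact ih _ w hw

theorem pvInter_cons (s a : List Char) (l : List (List Char)) (hl : l ≠ []) :
    List.intercalate s (a :: l) = a ++ s ++ List.intercalate s l := by
  rcases l with _ | ⟨b, t⟩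
  · simp_all
  · simp [List.intercalate, List.intersperse]

theorem pvInter_singleton (s a : List Char) : List.intercalate s [a] = a := by
  simp [List.intercalate]

theorem pvInter_ne_nil (s : List Char) (l : List (List Char))
    (h : ∀ w ∈ l, w ≠ []) (hne : l ≠ []) : List.intercalate s l ≠ [] := by
  rcases l with _ | ⟨w, t⟩
  · simp_all
  · rcases t with _ | ⟨b, t'⟩
    · rw [pvInter_singleton]; exact h w (by simp)
    · rw [pvInter_cons _ _ _ (by simp)]
      have := h w (by simp)
      simp_all

-- right-stripping a no-"__" list prefixed with a pending non-'_' word buffer = '_'-join of its words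
theorem pvMain (n : Nat) :
    ∀ l buf, l.length ≤ n → ¬ ['_','_'] <:+: l → buf ≠ [] → '_' ∉ buf →
      pvRst (buf ++ l) = List.intercalate ['_'] (pvWacc buf l) := by
  induction n with
  | zero =>
    intro l buf hn _ hb hu
    have : l = [] := by cases l <;> simp_all
    subst this
    rw [pvWacc_nil, if_neg hb, pvInter_singleton]
    simpa using pvRst_no_underscore buf hb hu
  | succ n ih =>
    intro l buf hn hnd hb hu
    match l with
    | [] =>
      rw [pvWacc_nil, if_neg hb, pvInter_singleton]
      simpa using pvRst_no_underscore buf hb hu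
    | c :: t =>
      by_cases h1 : c = '_'
      · subst h1
        rw [pvWacc_us, if_neg hb]
        match t with
        | [] =>
          have hrb : pvRst (buf ++ ['_']) = buf := by
            rw [pvRst, List.reverse_append]
            simp only [List.reverse_cons, List.reverse_nil, List.nil_append,
              List.singleton_append]
            have := pvRst_no_underscore buf hb hu
            rwa [pvRst] at this
          rw [hrb]
          rw [show pvWacc [] ([] : List Char) = [] from rfl]
          rw [List.append_nil, pvInter_singleton]
        | d :: t' =>
          have hd : d ≠ '_' := by
            rintro rfl
            exact hnd (List.infix_cons_iff.mpr (Or.inl (by simp [List.cons_prefix_cons])))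
          have hndt' : ¬ ['_','_'] <:+: t' := fun hi =>
            hnd (hi.trans ((List.suffix_cons _ _).trans (List.suffix_cons _ _)).isInfix)
          have hrec := ih t' [d] (by simp at hn; omega) hndt' (by simp) (by simp [Ne.symm hd])
          have hdw : (d :: t').reverse.dropWhile (· == '_') ≠ [] := by
            rw [Ne, List.dropWhile_eq_nil_iff]
            intro hall
            have := hall d (by simp)
            simp at this; exact hd this
          have hsplit : pvRst (buf ++ '_' :: d :: t') = (buf ++ ['_']) ++ pvRst (d :: t') := by
            have := pvRst_append (buf ++ ['_']) (d :: t') hdw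
            simpa using this
          rw [hsplit]
          have hstep : pvWacc [] (d :: t') = pvWacc [d] t' := by
            rw [pvWacc_ne _ _ _ hd]; simp
          have hne : pvWacc [] (d :: t') ≠ [] := by
            rw [hstep]; exact pvWacc_ne_nil _ _ (by simp)
          have hne' : pvWacc [d] t' ≠ [] := hstep ▸ hne
          rw [List.singleton_append] at hrec
          rw [List.singleton_append, hstep, pvInter_cons _ _ _ hne', ← hrec]
      · rw [pvWacc_ne _ _ _ h1]
        have hrec := ih t (buf ++ [c]) (by simp at hn; omega)
          (fun hi => hnd (hi.trans (List.suffix_cons _ _).isInfix))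
          (by simp) (by simp [hu, Ne.symm h1])
        rw [← hrec]; simp

theorem pvLst_wacc (m : List Char) : pvWacc [] (pvLst m) = pvWacc [] m := by
  induction m with
  | nil => simp [pvLst]
  | cons c t ih =>
    by_cases h : c = '_'
    · subst h
      rw [pvLst, List.dropWhile_cons_of_pos (by simp)]
      rw [show pvWacc [] ('_' :: t) = pvWacc [] t by rw [pvWacc_us]; simp]
      simpa [pvLst] using ih
    · rw [pvLst, List.dropWhile_cons_of_neg (by simp [h])]

theorem pvDropWhile_head (p : Char → Bool) (l : List Char) (c : Char) (t : List Char)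
    (h : l.dropWhile p = c :: t) : p c = false := by
  induction l with
  | nil => simp at h
  | cons a l ih =>
    by_cases ha : p a
    · rw [List.dropWhile_cons_of_pos ha] at h; exact ih h
    · rw [List.dropWhile_cons_of_neg ha] at h
      cases h; simpa using ha

theorem pvStrip_main (m : List Char) (hnd : ¬ ['_','_'] <:+: m) :
    pvRst (pvLst m) = List.intercalate ['_'] (pvWacc [] m) := by
  rcases h : pvLst m with _ | ⟨c, t⟩
  · rw [← pvLst_wacc, h]
    rw [show pvWacc [] ([] : List Char) = [] from rfl]
    simp [pvRst, List.intercalate]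
  · have hc : c ≠ '_' := by
      have := pvDropWhile_head _ _ _ _ h
      simpa using this
    have hsuf : (c :: t) <:+ m := by rw [← h]; exact List.dropWhile_suffix _
    have hndt : ¬ ['_','_'] <:+: t := fun hi =>
      hnd (hi.trans ((List.suffix_cons _ _).trans hsuf).isInfix)
    have hmain := pvMain t.length t [c] le_rfl hndt (by simp) (by simp [Ne.symm hc])
    rw [← pvLst_wacc, h, pvWacc_ne _ _ _ hc]
    simpa using hmain

-- ===== VERDICT (by name: the statement is the Claim_ definition above) =====
theorem sanitize_token_py_spec : Claim_equal_sanitize_token_py := by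
  intro s _
  unfold Spec_sanitize_token_py sanitize_token_py sanitize_token_py_alt
  simp only [pvFoldA, List.nil_append]
  obtain ⟨hw, hnd⟩ := pvCollapse_spec (s.toList.map pvF)
  rw [pvStripChars_eq, pvStrip_main _ ((PySem.Chars.isIn_eq_false_iff _ _).mp hnd), hw]
  have hfb := pvFoldB s.toList [] []
  rw [List.nil_append] at hfb
  rw [hfb]
  rcases hW : pvWacc [] (s.toList.map pvF) with _ | ⟨w, t⟩
  · simp [List.intercalate]
  · have hnn : List.intercalate ['_'] (w :: t) ≠ [] := by
      refine pvInter_ne_nil _ _ ?_ (by simp)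
      intro x hx
      exact pvWacc_mem_ne_nil _ [] x (hW ▸ hx)
    rw [if_neg hnn, if_neg (by simp)]
    rw [PySem.Chars.join]
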